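-- pv_equiv track=rewrite | github.com/chris-koch-penn/AttenGen | genetic_algorithm.py | create_gene_start_end_idxs
-- ===== SOURCE A (Python) =====
-- def create_gene_start_end_idxs(seqs):
--     gene_start_end_idxs = []
--     start, end = 0, 0
--     for gene in seqs:
--         end = start + len(gene)
--         gene_start_end_idxs.append((start, end))
--         start = end
--     return gene_start_end_idxs
-- ===== SOURCE B (Python) =====
-- def create_gene_start_end_idxs(seqs):
--     # Divide and conquer: index each half independently (each half starting
--     # from 0), then shift the right half's intervals by the left half's total
--     # length. Correct because intervals are translation-covariant in the
--     # starting offset.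
--     def go(part):
--         # returns (pairs, total_length_of_part)
--         if not part:
--             return [], 0
--         if len(part) == 1:
--             n = len(part[0])
--             return [(0, n)], n
--         mid = len(part) // 2
--         left_pairs, left_len = go(part[:mid])
--         right_pairs, right_len = go(part[mid:])
--         return (left_pairs + [(s + left_len, e + left_len) for (s, e) in right_pairs],
--                 left_len + right_len)
--     return go(seqs)[0]
-- ===== Notes on version B (the rewrite author's own statement) =====
-- stated objective: alternative
-- what changed: B replaces A's single left-to-right loop threading a running start/end accumulator by a divide-and-conquer recursion: each half of the list is indexed independently from offset 0 and the right half's intervals are then shifted by the left half's total length.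
import Mathlib
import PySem

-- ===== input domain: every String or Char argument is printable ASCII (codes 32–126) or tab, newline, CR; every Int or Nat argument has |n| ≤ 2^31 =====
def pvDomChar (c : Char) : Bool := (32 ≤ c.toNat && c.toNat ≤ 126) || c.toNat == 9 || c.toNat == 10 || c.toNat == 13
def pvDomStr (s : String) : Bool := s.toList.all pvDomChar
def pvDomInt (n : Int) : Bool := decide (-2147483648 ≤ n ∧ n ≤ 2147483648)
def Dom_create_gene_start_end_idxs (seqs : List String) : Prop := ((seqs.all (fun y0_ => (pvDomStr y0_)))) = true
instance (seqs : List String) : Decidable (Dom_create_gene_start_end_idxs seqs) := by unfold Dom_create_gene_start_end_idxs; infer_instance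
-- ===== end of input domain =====

-- B replaces A's running start/end loop by a divide-and-conquer recursion that
-- indexes each half from 0 and shifts the right half (alternative decomposition).

-- ===== PORT A =====
-- A: one loop threading (acc, start, end); each step appends (start, start+len) and advances start.
def create_gene_start_end_idxs (seqs : List String) : List (Int × Int) :=
  (seqs.foldl
    (fun (st : List (Int × Int) × Int × Int) gene =>
      let e := st.2.1 + PySem.Str.len gene
      (st.1 ++ [(st.2.1, e)], e, e))
    ([], 0, 0)).1

-- ===== PORT B =====
-- B's helper go: returns (pairs of the part indexed from 0, total length of the part);
-- splits at len//2, recurses on both halves, shifts the right half's pairs by the left total.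
def pvGoB : List String → List (Int × Int) × Int
  | [] => ([], 0)
  | [g] => ([(0, PySem.Str.len g)], PySem.Str.len g)
  | a :: b :: rest =>
    let part := a :: b :: rest
    let mid := part.length / 2
    let L := pvGoB (part.take mid)
    let R := pvGoB (part.drop mid)
    (L.1 ++ R.1.map (fun p => (p.1 + L.2, p.2 + L.2)), L.2 + R.2)
termination_by part => part.length
decreasing_by
  · simp [List.length_take]; omega
  · simp [List.length_drop]; omega

def create_gene_start_end_idxs_alt (seqs : List String) : List (Int × Int) :=
  (pvGoB seqs).1

-- ===== PRECONDITION & SPEC =====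
def Spec_create_gene_start_end_idxs (seqs : List String) (out : List (Int × Int)) : Prop := out = create_gene_start_end_idxs_alt seqs
instance (seqs : List String) (out : List (Int × Int)) : Decidable (Spec_create_gene_start_end_idxs seqs out) := by unfold Spec_create_gene_start_end_idxs; infer_instance

-- ===== CLAIM (what is proved, stated in full; the proofs are below) =====
def Claim_equal_create_gene_start_end_idxs : Prop := ∀ (seqs : List String), Dom_create_gene_start_end_idxs seqs → Spec_create_gene_start_end_idxs seqs (create_gene_start_end_idxs seqs)

-- ===== LEMMAS AND PROOFS =====

-- Canonical recursive characterisation: pairs starting at offset s.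
def pvPairs (s : Int) : List String → List (Int × Int)
  | [] => []
  | g :: rest => (s, s + PySem.Str.len g) :: pvPairs (s + PySem.Str.len g) rest

def pvTot : List String → Int
  | [] => 0
  | g :: rest => PySem.Str.len g + pvTot rest

theorem pvPairs_shift (xs : List String) (s d : Int) :
    pvPairs (s + d) xs = (pvPairs s xs).map (fun p => (p.1 + d, p.2 + d)) := by
  induction xs generalizing s with
  | nil => simp [pvPairs]
  | cons g rest ih =>
      simp only [pvPairs, List.map_cons]
      refine congrArg₂ _ (by ring_nf) ?_
      rw [← ih]; ring_nf

theorem pvPairs_append (xs ys : List String) (s : Int) :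
    pvPairs s (xs ++ ys) = pvPairs s xs ++ pvPairs (s + pvTot xs) ys := by
  induction xs generalizing s with
  | nil => simp [pvPairs, pvTot]
  | cons g rest ih =>
      simp only [List.cons_append, pvPairs, pvTot, ih]
      rw [show s + PySem.Str.len g + pvTot rest = s + (PySem.Str.len g + pvTot rest) by ring]

theorem pvTot_append (xs ys : List String) : pvTot (xs ++ ys) = pvTot xs + pvTot ys := by
  induction xs with
  | nil => simp [pvTot]
  | cons g rest ih => simp [pvTot, ih]; ring

-- B's divide-and-conquer computes exactly (pvPairs 0, pvTot).
theorem pvGoB_eq (xs : List String) : pvGoB xs = (pvPairs 0 xs, pvTot xs) := by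
  induction xs using pvGoB.induct with
  | case1 => simp [pvGoB, pvPairs, pvTot]
  | case2 g => simp [pvGoB, pvPairs, pvTot]
  | case3 a b rest part mid ihT ihD =>
      rw [pvGoB]
      simp only [part, mid] at ihT ihD
      rw [ihT, ihD]
      dsimp only
      rw [Prod.mk.injEq]
      have hsplit : (a :: b :: rest) =
          ((a :: b :: rest).take ((a :: b :: rest).length / 2)) ++
          ((a :: b :: rest).drop ((a :: b :: rest).length / 2)) :=
        (List.take_append_drop _ _).symm
      constructor
      · conv_rhs => rw [hsplit]
        rw [pvPairs_append]
        congr 1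
        have := pvPairs_shift ((a :: b :: rest).drop ((a :: b :: rest).length / 2)) 0
          (pvTot ((a :: b :: rest).take ((a :: b :: rest).length / 2)))
        simpa using this.symm
      · conv_rhs => rw [hsplit, pvTot_append]

-- A's loop, generalised: the end component is irrelevant, start s produces pvPairs s.
theorem loopA_general (seqs : List String) (acc : List (Int × Int)) (s e : Int) :
    (seqs.foldl
      (fun (st : List (Int × Int) × Int × Int) gene =>
        let e := st.2.1 + PySem.Str.len gene
        (st.1 ++ [(st.2.1, e)], e, e))
      (acc, s, e)).1 = acc ++ pvPairs s seqs := by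
  induction seqs generalizing acc s e with
  | nil => simp [pvPairs]
  | cons g rest ih =>
      simp only [List.foldl_cons]
      rw [ih]
      simp [pvPairs]

-- ===== VERDICT (by name: the statement is the Claim_ definition above) =====
theorem create_gene_start_end_idxs_spec : Claim_equal_create_gene_start_end_idxs := by
  intro seqs _
  unfold Spec_create_gene_start_end_idxs create_gene_start_end_idxs create_gene_start_end_idxs_alt
  rw [pvGoB_eq]
  simpa using loopA_general seqs [] 0 0
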